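-- pv_equiv track=rewrite | github.com/TheOneNyangweso/Data_Science-In-Python | Python projects/CAB203_GraphsProjectBundle/project_trial_2.py | gamesOK
-- ===== SOURCE A (Python) =====
-- def gamesOK(games):
--     players = {player for game in games for player in game}
--     player_games = {player: {
--         opponent for game in games if player in game for opponent in game if opponent != player} for player in players}
--     return all(
--         len(player_games[player]) == len(player_games[next(iter(players))]) and
--         all(
--             opponent in player_games[player] or len(
--                 player_games[player] & player_games[opponent]) >= 2
--             for opponent in players if opponent != player
--         )
--         for player in players
--     )
-- ===== SOURCE B (Python) =====
-- def gamesOK(games):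
--     # One pass over games builds the adjacency map; then check all degrees
--     # equal and every pair adjacent or sharing >= 2 common opponents.
--     adj = {}
--     for game in games:
--         for player in game:
--             if player not in adj:
--                 adj[player] = set()
--             for opponent in game:
--                 if opponent != player:
--                     adj[player].add(opponent)
--     players = list(adj)
--     if not players:
--         return True
--     d0 = len(adj[players[0]])
--     if any(len(adj[p]) != d0 for p in players):
--         return False
--     return all(q == p or q in adj[p] or len(adj[p] & adj[q]) >= 2
--                for p in players for q in players)
-- ===== Notes on version B (the rewrite author's own statement) =====
-- stated objective: faster
-- what changed: B builds the adjacency map in a single pass over the games (adding each game's opponents to each participant's set) instead of re-scanning the whole game list once per player, then checks all degrees against the first and runs the pair check with early exit.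
import Mathlib
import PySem

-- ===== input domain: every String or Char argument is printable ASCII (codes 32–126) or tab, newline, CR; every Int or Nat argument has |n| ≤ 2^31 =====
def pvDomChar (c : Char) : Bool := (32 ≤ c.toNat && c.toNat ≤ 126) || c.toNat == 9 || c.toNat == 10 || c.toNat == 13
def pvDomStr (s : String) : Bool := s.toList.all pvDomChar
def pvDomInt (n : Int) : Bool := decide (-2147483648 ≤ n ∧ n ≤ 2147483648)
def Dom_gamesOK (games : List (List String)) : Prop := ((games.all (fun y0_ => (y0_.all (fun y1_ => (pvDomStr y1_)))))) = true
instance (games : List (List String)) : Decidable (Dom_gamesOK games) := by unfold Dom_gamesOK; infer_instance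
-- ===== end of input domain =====

-- B builds the adjacency map in one pass over the games instead of rescanning all games per player; same return value.
-- ===== PORT A =====
-- {opponent for game in games if player in game for opponent in game if opponent != player}
def pvOppList (p : String) (games : List (List String)) : List String :=
  games.flatMap (fun g => if g.contains p then g.filter (fun o => o ≠ p) else [])

def gamesOK (games : List (List String)) : Bool :=
  let players : PySem.Set String := PySem.Set.ofList (games.flatMap id)
  let pg : PySem.Dict String (PySem.Set String) :=
    players.foldl (fun d p => d.insert p (PySem.Set.ofList (pvOppList p games))) PySem.Dict.empty
  -- next(iter(players)): some element of the set; only its set's size is used, and all degrees are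
  -- compared to it, so the result does not depend on which element Python's hash order yields first.
  players.all (fun p =>
    (PySem.Set.len (pg.getD p PySem.Set.empty) == PySem.Set.len (pg.getD (players.headD "") PySem.Set.empty)) &&
    (players.filter (fun o => o ≠ p)).all (fun o =>
      (pg.getD p PySem.Set.empty).contains o ||
      decide (2 ≤ PySem.Set.len (PySem.Set.inter (pg.getD p PySem.Set.empty) (pg.getD o PySem.Set.empty)))))

-- ===== PORT B =====
-- inner loop: for opponent in game: if opponent != player: adj[player].add(opponent)
def pvAddOpps (g : List String) (d : PySem.Dict String (PySem.Set String)) (p : String) :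
    PySem.Dict String (PySem.Set String) :=
  g.foldl (fun d o => if o ≠ p then d.modify p PySem.Set.empty (fun s => PySem.Set.add s o) else d) d

-- body of "for player in game": setdefault-style insert, then add opponents
def pvStepPlayer (g : List String) (d : PySem.Dict String (PySem.Set String)) (p : String) :
    PySem.Dict String (PySem.Set String) :=
  pvAddOpps g (if d.contains p then d else d.insert p PySem.Set.empty) p

def pvStepGame (d : PySem.Dict String (PySem.Set String)) (g : List String) :
    PySem.Dict String (PySem.Set String) :=
  g.foldl (pvStepPlayer g) d

def gamesOK_alt (games : List (List String)) : Bool :=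
  let adj := games.foldl pvStepGame PySem.Dict.empty
  let players := adj.keys
  match players with
  | [] => true
  | p0 :: _ =>
    let d0 := PySem.Set.len (adj.getD p0 PySem.Set.empty)
    if players.any (fun p => PySem.Set.len (adj.getD p PySem.Set.empty) ≠ d0) then false
    else players.all (fun p => players.all (fun q =>
      q == p || (adj.getD p PySem.Set.empty).contains q ||
      decide (2 ≤ PySem.Set.len (PySem.Set.inter (adj.getD p PySem.Set.empty) (adj.getD q PySem.Set.empty)))))

-- ===== PRECONDITION & SPEC =====
def Spec_gamesOK (games : List (List String)) (out : Bool) : Prop := out = gamesOK_alt games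
instance (games : List (List String)) (out : Bool) : Decidable (Spec_gamesOK games out) := by unfold Spec_gamesOK; infer_instance

-- ===== CLAIM (what is proved, stated in full; the proofs are below) =====
def Claim_equal_gamesOK : Prop := ∀ (games : List (List String)), Dom_gamesOK games → Spec_gamesOK games (gamesOK games)

-- ===== LEMMAS AND PROOFS =====
-- abbreviation used only by the proofs: the opponent set of p
def pvE (p : String) (games : List (List String)) : PySem.Set String :=
  PySem.Set.ofList (pvOppList p games)

lemma pvSet_update_of_subset {s : PySem.Set String} {xs : List String}
    (h : ∀ y ∈ xs, y ∈ s) : s.update xs = s := by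
  rw [PySem.Set.update_eq_append_filter]
  have : List.filter (fun y => !s.contains y) (PySem.Set.ofList xs) = [] := by
    rw [List.filter_eq_nil_iff]
    intro y hy
    simp [h y ((PySem.Set.mem_ofList xs y).1 hy)]
  simp only [this, List.append_nil]

lemma pvSet_update_idem (s : PySem.Set String) (xs : List String) :
    (s.update xs).update xs = s.update xs :=
  pvSet_update_of_subset (fun y hy => (PySem.Set.mem_update s xs y).2 (Or.inr hy))

-- entry of p after the opponents-adding loop for p
lemma pvAddOpps_getD_self (g : List String) (p : String)
    (d : PySem.Dict String (PySem.Set String)) :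
    (pvAddOpps g d p).getD p PySem.Set.empty
      = (d.getD p PySem.Set.empty).update (g.filter (fun o => o ≠ p)) := by
  induction g generalizing d with
  | nil => simp [pvAddOpps, PySem.Set.update_nil]
  | cons o g ih =>
    simp only [pvAddOpps, List.foldl_cons, List.filter_cons] at *
    by_cases h : o = p
    · simpa [h] using ih d
    · simp only [ne_eq, decide_not] at *
      simp only [h, decide_false, Bool.not_false, not_false_eq_true, if_true]
      rw [ih, PySem.Dict.getD_modify_self, PySem.Set.update_cons]

lemma pvAddOpps_getD_of_ne (g : List String) {p q : String} (h : q ≠ p)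
    (d : PySem.Dict String (PySem.Set String)) :
    (pvAddOpps g d p).getD q PySem.Set.empty = d.getD q PySem.Set.empty := by
  induction g generalizing d with
  | nil => simp [pvAddOpps]
  | cons o g ih =>
    simp only [pvAddOpps, List.foldl_cons] at *
    split
    · rw [ih, PySem.Dict.getD_modify_of_ne _ _ _ h]
    · exact ih d

lemma pvSetdefault_getD (p p' : String) (d : PySem.Dict String (PySem.Set String)) :
    ((if d.contains p' then d else d.insert p' PySem.Set.empty).getD p PySem.Set.empty)
      = d.getD p PySem.Set.empty := by
  split
  · rfl
  · rename_i h
    rw [PySem.Dict.getD_insert]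
    split
    · rename_i hp; subst hp
      rw [PySem.Dict.getD_of_not_contains d _ (by simpa using h)]
    · rfl

lemma pvStepPlayer_getD (g : List String) (p p' : String)
    (d : PySem.Dict String (PySem.Set String)) :
    (pvStepPlayer g d p').getD p PySem.Set.empty
      = if p = p' then (d.getD p PySem.Set.empty).update (g.filter (fun o => o ≠ p))
        else d.getD p PySem.Set.empty := by
  unfold pvStepPlayer
  by_cases h : p = p'
  · subst h
    rw [if_pos rfl, pvAddOpps_getD_self, pvSetdefault_getD]
  · rw [if_neg h, pvAddOpps_getD_of_ne _ (fun he => h he) _, pvSetdefault_getD]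

lemma pvFoldPlayers_getD (g ps : List String) (p : String)
    (d : PySem.Dict String (PySem.Set String)) :
    ((ps.foldl (pvStepPlayer g) d).getD p PySem.Set.empty)
      = if p ∈ ps then (d.getD p PySem.Set.empty).update (g.filter (fun o => o ≠ p))
        else d.getD p PySem.Set.empty := by
  induction ps generalizing d with
  | nil => simp
  | cons q ps ih =>
    simp only [List.foldl_cons]
    rw [ih, pvStepPlayer_getD]
    by_cases hpq : p = q
    · subst hpq
      by_cases hps : p ∈ ps <;>
        simp [hps, pvSet_update_idem]
    · by_cases hps : p ∈ ps <;>
        simp [hps, hpq]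

lemma pvStepGame_getD (g : List String) (p : String)
    (d : PySem.Dict String (PySem.Set String)) :
    (pvStepGame d g).getD p PySem.Set.empty
      = if p ∈ g then (d.getD p PySem.Set.empty).update (g.filter (fun o => o ≠ p))
        else d.getD p PySem.Set.empty :=
  pvFoldPlayers_getD g g p d

lemma pvBuildAdj_getD (games : List (List String)) (p : String)
    (d : PySem.Dict String (PySem.Set String)) :
    ((games.foldl pvStepGame d).getD p PySem.Set.empty)
      = (d.getD p PySem.Set.empty).update (pvOppList p games) := by
  induction games generalizing d with
  | nil => simp [pvOppList, PySem.Set.update_nil]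
  | cons g gs ih =>
    simp only [List.foldl_cons]
    rw [ih, pvStepGame_getD]
    have : pvOppList p (g :: gs)
        = (if g.contains p then g.filter (fun o => o ≠ p) else []) ++ pvOppList p gs := by
      simp [pvOppList]
    rw [this, PySem.Set.update_append]
    by_cases h : p ∈ g <;> simp [h, PySem.Set.update_nil]

lemma pvBuildAdj_entry (games : List (List String)) (p : String) :
    ((games.foldl pvStepGame PySem.Dict.empty).getD p PySem.Set.empty) = pvE p games := by
  rw [pvBuildAdj_getD]
  simp [pvE, PySem.Dict.getD_empty, PySem.Set.update_nil_left]

-- keys of the one-pass dict: exactly the dedup of all players in appearance order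
lemma pvAddOpps_keys (g : List String) (p : String)
    (d : PySem.Dict String (PySem.Set String)) (hp : p ∈ d.keys) :
    (pvAddOpps g d p).keys = d.keys := by
  induction g generalizing d with
  | nil => simp [pvAddOpps]
  | cons o g ih =>
    simp only [pvAddOpps, List.foldl_cons] at *
    split
    · rw [ih]
      · rw [PySem.Dict.keys_modify,
          PySem.Dict.keys_insert_of_contains _ _ ((PySem.Dict.contains_iff_mem_keys d p).2 hp)]
      · rw [PySem.Dict.keys_modify,
          PySem.Dict.keys_insert_of_contains _ _ ((PySem.Dict.contains_iff_mem_keys d p).2 hp)]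
        exact hp
    · exact ih d hp

lemma pvStepPlayer_keys (g : List String) (p : String)
    (d : PySem.Dict String (PySem.Set String)) :
    (pvStepPlayer g d p).keys = PySem.Set.add d.keys p := by
  unfold pvStepPlayer
  by_cases h : d.contains p = true
  · have hp := (PySem.Dict.contains_iff_mem_keys d p).1 h
    rw [if_pos h, pvAddOpps_keys _ _ _ hp, PySem.Set.add_of_mem hp]
  · have h' : d.contains p = false := by simpa using h
    have hk : (d.insert p PySem.Set.empty).keys = d.keys ++ [p] :=
      PySem.Dict.keys_insert_of_not_contains d _ h'
    rw [if_neg h, pvAddOpps_keys _ _ _ (by rw [hk]; simp), hk,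
      PySem.Set.add_of_not_mem]
    intro hc
    exact h ((PySem.Dict.contains_iff_mem_keys d p).2 hc)

lemma pvFoldPlayers_keys (g ps : List String)
    (d : PySem.Dict String (PySem.Set String)) :
    (ps.foldl (pvStepPlayer g) d).keys = PySem.Set.update d.keys ps := by
  induction ps generalizing d with
  | nil => simp [PySem.Set.update_nil]
  | cons q ps ih =>
    simp only [List.foldl_cons]
    rw [ih, pvStepPlayer_keys, PySem.Set.update_cons]

lemma pvBuildAdj_keys (games : List (List String)) :
    (games.foldl pvStepGame PySem.Dict.empty).keys
      = PySem.Set.ofList (games.flatMap id) := by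
  suffices h : ∀ (gs : List (List String)) (d : PySem.Dict String (PySem.Set String)),
      (gs.foldl pvStepGame d).keys = PySem.Set.update d.keys (gs.flatMap id) by
    rw [h]
    simp [PySem.Dict.keys_empty, PySem.Set.update_nil_left]
  intro gs
  induction gs with
  | nil => simp [PySem.Set.update_nil]
  | cons g gs ih =>
    intro d
    simp only [List.foldl_cons, List.flatMap_cons, id]
    rw [ih, pvStepGame, pvFoldPlayers_keys, PySem.Set.update_append]

-- A's dict of opponent sets: lookup at a listed player
lemma pvPgDict_getD (games : List (List String)) (ps : List String) (p : String)
    (d : PySem.Dict String (PySem.Set String)) :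
    ((ps.foldl (fun d q => d.insert q (PySem.Set.ofList (pvOppList q games))) d).getD p PySem.Set.empty)
      = if p ∈ ps then pvE p games else d.getD p PySem.Set.empty := by
  induction ps generalizing d with
  | nil => simp
  | cons q ps ih =>
    simp only [List.foldl_cons]
    rw [ih]
    by_cases hps : p ∈ ps
    · simp [hps]
    · by_cases hpq : p = q
      · subst hpq
        simp [hps, pvE]
      · simp [hps, hpq, PySem.Dict.getD_insert]

lemma pvOppList_eq_nil_of_not_mem {p : String} {games : List (List String)}
    (h : p ∉ games.flatMap id) : pvOppList p games = [] := by
  unfold pvOppList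
  rw [List.flatMap_eq_nil_iff]
  intro g hg
  have : p ∉ g := fun hpg => h (List.mem_flatMap.2 ⟨g, hg, hpg⟩)
  simp [this]

-- the common Boolean shape of the two final checks
lemma pvShape {α : Type} [BEq α] [LawfulBEq α] [DecidableEq α]
    (p0 : α) (rest : List α) (f : α → Int) (C : α → α → Bool) :
    ((p0 :: rest).all (fun p => (f p == f p0) &&
        ((p0 :: rest).filter (fun o => o ≠ p)).all (fun o => C p o)))
      = if (p0 :: rest).any (fun p => decide (f p ≠ f p0)) then false
        else (p0 :: rest).all (fun p => (p0 :: rest).all (fun q => q == p || C p q)) := by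
  by_cases hany : ((p0 :: rest).any (fun p => decide (f p ≠ f p0))) = true
  · rw [if_pos hany]
    rcases List.any_eq_true.1 hany with ⟨p, hp, hne⟩
    apply Bool.eq_false_iff.2
    intro hall
    have h1 := List.all_eq_true.1 hall p hp
    have hne' : f p ≠ f p0 := by simpa using hne
    exact hne' (beq_iff_eq.1 ((Bool.and_eq_true _ _).mp h1).1)
  · rw [if_neg hany]
    have hdeg : ∀ p ∈ p0 :: rest, f p = f p0 := by
      intro p hp
      by_contra hne
      exact hany (List.any_eq_true.2 ⟨p, hp, by simpa using hne⟩)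
    rw [Bool.eq_iff_iff]
    simp only [List.all_eq_true, Bool.and_eq_true, List.mem_filter, Bool.or_eq_true,
      beq_iff_eq, decide_eq_true_eq]
    constructor
    · intro h p hp q hq
      by_cases hqp : q = p
      · exact Or.inl hqp
      · exact Or.inr ((h p hp).2 q ⟨hq, by simpa using hqp⟩)
    · intro h p hp
      refine ⟨hdeg p hp, ?_⟩
      intro q hq
      rcases h p hp q hq.1 with h3 | h3
      · exact absurd h3 (by simpa using hq.2)
      · exact h3

lemma pvMain (games : List (List String)) : gamesOK games = gamesOK_alt games := by
  have hB : ∀ p, ((games.foldl pvStepGame PySem.Dict.empty).getD p PySem.Set.empty)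
      = pvE p games := pvBuildAdj_entry games
  have hA : ∀ p : String,
      (((PySem.Set.ofList (games.flatMap id)).foldl
          (fun d q => d.insert q (PySem.Set.ofList (pvOppList q games)))
          PySem.Dict.empty).getD p PySem.Set.empty)
        = pvE p games := by
    intro p
    rw [pvPgDict_getD]
    split
    · rfl
    · rename_i h
      rw [PySem.Dict.getD_empty, pvE,
        pvOppList_eq_nil_of_not_mem (fun hm => h ((PySem.Set.mem_ofList _ _).2 hm))]
      rfl
  simp only [gamesOK, gamesOK_alt, pvBuildAdj_keys, hA, hB]
  rcases hL : PySem.Set.ofList (games.flatMap id) with _ | ⟨p0, rest⟩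
  · simp
  · simp only [List.headD_cons, Bool.or_assoc]
    exact pvShape p0 rest (fun p => PySem.Set.len (pvE p games))
      (fun p q => (pvE p games).contains q ||
        decide (2 ≤ PySem.Set.len ((pvE p games).inter (pvE q games))))

-- ===== VERDICT (by name: the statement is the Claim_ definition above) =====
theorem gamesOK_spec : Claim_equal_gamesOK := by
  intro games _
  unfold Spec_gamesOK
  exact pvMain games
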